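-- pv_equiv track=rewrite | github.com/liziling98/text-compression | huff-compress.py | codeStr
-- ===== SOURCE A (Python) =====
-- def codeStr(text, code_dic):
--     '''
--     parametres:
--     text: the whole char/word/symbol in the orignal text
--     code_dic: {char/word : code}
--     return:
--     code_str_list: the encode string by 8 bits in a list
--     num: the num of supplement 0
--     '''
--     # get code for every char/word
--     code_string = ''
--     for item in text:
--         code_string += code_dic[item]
--     # if the lence of whole 0/1 string can not divide equally, add 0 in the end
--     # also, compress the number of supplement 0
--     if len(code_string) % 8 != 0:
--         num = len(code_string) % 8
--         code_string += (8 - num) * '0'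
--     else:
--         num = 8
--     add_0_num = 8 - num
--     # store the code_string by 8 bits in a list
--     code_str_list = [code_string[i:i+8] for i in range(0, len(code_string), 8)]
--     return code_str_list, add_0_num
-- ===== SOURCE B (Python) =====
-- def codeStr(text, code_dic):
--     """Streaming re-implementation: keep a rolling bit buffer, emit 8-bit
--     chunks as soon as they are complete, pad the final partial chunk."""
--     out = []
--     buf = ''
--     for item in text:
--         buf += code_dic[item]
--         while len(buf) >= 8:
--             out.append(buf[:8])
--             buf = buf[8:]
--     if buf:
--         return out + [buf + '0' * (8 - len(buf))], 8 - len(buf)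
--     return out, 0
-- ===== Notes on version B (the rewrite author's own statement) =====
-- stated objective: alternative
-- what changed: Instead of concatenating all codes into one big string and then slicing it into 8-bit pieces with a range-based comprehension, B streams: it keeps a rolling bit buffer, emits each 8-bit chunk as soon as it is complete, and pads only the final partial chunk.
import Mathlib
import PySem

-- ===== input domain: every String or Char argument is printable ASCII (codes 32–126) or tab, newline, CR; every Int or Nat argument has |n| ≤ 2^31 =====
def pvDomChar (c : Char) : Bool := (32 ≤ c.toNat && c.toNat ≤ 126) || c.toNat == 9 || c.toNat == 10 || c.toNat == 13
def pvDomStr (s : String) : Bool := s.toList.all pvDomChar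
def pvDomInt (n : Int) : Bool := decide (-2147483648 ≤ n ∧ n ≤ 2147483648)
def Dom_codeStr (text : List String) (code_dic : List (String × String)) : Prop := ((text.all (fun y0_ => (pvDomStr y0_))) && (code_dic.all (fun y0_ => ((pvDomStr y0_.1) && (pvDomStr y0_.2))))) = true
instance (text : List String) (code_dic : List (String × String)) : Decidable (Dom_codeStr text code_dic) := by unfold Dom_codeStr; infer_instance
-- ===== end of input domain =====

-- B changes the decomposition (streaming buffer that emits 8-bit chunks inline, instead of
-- build-whole-string-then-slice); the string is modelled as List Char per the PySem convention.

-- ===== PORT A =====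
-- code_string = ''; for item in text: code_string += code_dic[item]
-- (under Pre_ every item is a key, so getD never takes its default)
def codeStrBits (text : List String) (code_dic : List (String × String)) : List Char :=
  text.foldl (fun acc item => acc ++ (PySem.Dict.getD (PySem.Dict.mk code_dic) item "").toList) []

def codeStr (text : List String) (code_dic : List (String × String)) : List String × Int :=
  let code_string := codeStrBits text code_dic
  -- if len(code_string) % 8 != 0: num = len % 8; code_string += (8-num)*'0'  else: num = 8
  let p : List Char × Nat :=
    if code_string.length % 8 ≠ 0 then
      (code_string ++ List.replicate (8 - code_string.length % 8) '0', code_string.length % 8)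
    else (code_string, 8)
  let add_0_num : Int := ((8 - p.2 : Nat) : Int)
  -- [code_string[i:i+8] for i in range(0, len(code_string), 8)]
  let code_str_list :=
    (PySem.List.pyRange 0 (p.1.length : Int) 8).map
      (fun i => String.ofList (PySem.List.slice p.1 (some i) (some (i + 8))))
  (code_str_list, add_0_num)

-- ===== PORT B =====
-- the inner 'while len(buf) >= 8: out.append(buf[:8]); buf = buf[8:]'
def bDrain (out : List String) (buf : List Char) : List String × List Char :=
  if _h : 8 ≤ buf.length then
    bDrain (out ++ [String.ofList (PySem.List.slice buf none (some 8))])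
           (PySem.List.slice buf (some 8) none)
  else (out, buf)
  termination_by buf.length
  decreasing_by simp [PySem.List.slice_from buf (a := 8) (by norm_num)]; omega

def codeStr_alt (text : List String) (code_dic : List (String × String)) : List String × Int :=
  let st := text.foldl
    (fun (st : List String × List Char) item =>
      bDrain st.1 (st.2 ++ (PySem.Dict.getD (PySem.Dict.mk code_dic) item "").toList)) ([], [])
  if st.2.isEmpty then (st.1, 0)
  else (st.1 ++ [String.ofList (st.2 ++ List.replicate (8 - st.2.length) '0')],
        ((8 - st.2.length : Nat) : Int))

-- ===== PRECONDITION & SPEC =====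
-- Pre_: every item of text is a key of code_dic (otherwise Python A raises KeyError).
def Pre_codeStr (text : List String) (code_dic : List (String × String)) : Prop :=
  ∀ item ∈ text, (PySem.Dict.get? (PySem.Dict.mk code_dic) item).isSome
instance (text : List String) (code_dic : List (String × String)) : Decidable (Pre_codeStr text code_dic) := by unfold Pre_codeStr; infer_instance

def pvWitness_codeStr : List String × (List (String × String)) :=
  (["a", "b", "a"], [("a", "01"), ("b", "1110")])

def Spec_codeStr (text : List String) (code_dic : List (String × String)) (out : List String × Int) : Prop := out = codeStr_alt text code_dic
instance (text : List String) (code_dic : List (String × String)) (out : List String × Int) : Decidable (Spec_codeStr text code_dic out) := by unfold Spec_codeStr; infer_instance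

-- ===== CLAIM (what is proved, stated in full; the proofs are below) =====
def Claim_equal_codeStr : Prop := ∀ (text : List String) (code_dic : List (String × String)), Dom_codeStr text code_dic → Pre_codeStr text code_dic → Spec_codeStr text code_dic (codeStr text code_dic)

-- ===== LEMMAS AND PROOFS =====

-- reference chunker: what the drain loop does to a buffer, stated without the accumulator
def drainSpec (buf : List Char) : List String × List Char :=
  if _h : 8 ≤ buf.length then
    (String.ofList (buf.take 8) :: (drainSpec (buf.drop 8)).1, (drainSpec (buf.drop 8)).2)
  else ([], buf)
  termination_by buf.length
  decreasing_by simp; omega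

theorem drainSpec_short {buf : List Char} (h : ¬ 8 ≤ buf.length) : drainSpec buf = ([], buf) := by
  rw [drainSpec]; simp [h]

theorem drainSpec_long {buf : List Char} (h : 8 ≤ buf.length) :
    drainSpec buf = (String.ofList (buf.take 8) :: (drainSpec (buf.drop 8)).1, (drainSpec (buf.drop 8)).2) := by
  rw [drainSpec]; simp [h]

theorem bDrain_eq (out : List String) (buf : List Char) :
    bDrain out buf = (out ++ (drainSpec buf).1, (drainSpec buf).2) := by
  by_cases h : 8 ≤ buf.length
  · rw [bDrain, drainSpec_long h]
    simp only [h, dif_pos]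
    rw [PySem.List.slice_to buf (b := 8) (by norm_num),
        PySem.List.slice_from buf (a := 8) (by norm_num)]
    have := bDrain_eq (out ++ [String.ofList (buf.take ((8:Int).toNat))]) (buf.drop ((8:Int).toNat))
    rw [this]; simp
  · rw [bDrain, drainSpec_short h]; simp [h]
  termination_by buf.length
  decreasing_by simp; omega

theorem drainSpec_rem_length (buf : List Char) : (drainSpec buf).2.length = buf.length % 8 := by
  by_cases h : 8 ≤ buf.length
  · rw [drainSpec_long h]
    have := drainSpec_rem_length (buf.drop 8)
    simp at this ⊢; omega
  · rw [drainSpec_short h]; simp [Nat.mod_eq_of_lt (by omega : buf.length < 8)]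
  termination_by buf.length
  decreasing_by simp; omega

theorem drainSpec_append (a b : List Char) :
    drainSpec (a ++ b) =
      ((drainSpec a).1 ++ (drainSpec ((drainSpec a).2 ++ b)).1,
       (drainSpec ((drainSpec a).2 ++ b)).2) := by
  by_cases h : 8 ≤ a.length
  · have hab : 8 ≤ (a ++ b).length := by simp; omega
    rw [drainSpec_long hab, drainSpec_long h]
    have ht : (a ++ b).take 8 = a.take 8 := List.take_append_of_le_length h
    have hd : (a ++ b).drop 8 = a.drop 8 ++ b := List.drop_append_of_le_length h
    rw [ht, hd, drainSpec_append (a.drop 8) b]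
    simp
  · rw [drainSpec_short h]; simp
  termination_by a.length
  decreasing_by simp; omega

-- the fold in B, characterised via drainSpec of buffer ++ remaining concatenated codes
theorem alt_fold_eq (code_dic : List (String × String)) (text : List String)
    (out : List String) (buf : List Char) (hb : buf.length < 8) :
    text.foldl (fun (st : List String × List Char) item =>
        bDrain st.1 (st.2 ++ (PySem.Dict.getD (PySem.Dict.mk code_dic) item "").toList)) (out, buf) =
      (out ++ (drainSpec (buf ++ (text.map (fun it => (PySem.Dict.getD (PySem.Dict.mk code_dic) it "").toList)).flatten)).1,
       (drainSpec (buf ++ (text.map (fun it => (PySem.Dict.getD (PySem.Dict.mk code_dic) it "").toList)).flatten)).2) := by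
  induction text generalizing out buf with
  | nil => simp [drainSpec_short (by simpa using (by omega : ¬ 8 ≤ buf.length))]
  | cons hd tl ih =>
    simp only [List.foldl_cons, List.map_cons, List.flatten_cons]
    have hb' : (drainSpec (buf ++ (PySem.Dict.getD (PySem.Dict.mk code_dic) hd "").toList)).2.length < 8 := by
      rw [drainSpec_rem_length]; omega
    rw [bDrain_eq, ih _ _ hb', ← List.append_assoc,
        drainSpec_append (buf ++ (PySem.Dict.getD (PySem.Dict.mk code_dic) hd "").toList)]
    simp

-- A's accumulation is the same concatenation
theorem codeStrBits_eq (code_dic : List (String × String)) (text : List String) (init : List Char) :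
    text.foldl (fun acc item => acc ++ (PySem.Dict.getD (PySem.Dict.mk code_dic) item "").toList) init =
      init ++ (text.map (fun it => (PySem.Dict.getD (PySem.Dict.mk code_dic) it "").toList)).flatten := by
  induction text generalizing init with
  | nil => simp
  | cons hd tl ih => simp [List.foldl_cons, ih, List.append_assoc]

-- pyRange(0, L, 8) written as a mapped List.range
theorem pyRange08 (L : Nat) :
    PySem.List.pyRange 0 (L : Int) 8 =
      (List.range ((L + 7) / 8)).map (fun k => ((8 * k : Nat) : Int)) := by
  rw [PySem.List.pyRange_of_pos 0 (L : Int) (by norm_num)]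
  by_cases hL : 0 < L
  · rw [if_pos (by exact_mod_cast hL)]
    have hcast : ((L : Int) - 0 + 8 - 1) = ((L + 7 : Nat) : Int) := by push_cast; ring
    rw [hcast, show ((8:Int) = ((8:Nat):Int)) from rfl, ← Int.natCast_div, Int.toNat_natCast]
    apply List.map_congr_left
    intro k _
    push_cast; ring
  · have hL0 : L = 0 := by omega
    subst hL0
    rw [if_neg (by norm_num)]
    simp

-- A's slicing comprehension on an 8-divisible buffer, in take/drop form, is drainSpec's chunk list
theorem chunks_eq' (cs : List Char) (h : cs.length % 8 = 0) :
    (List.range (cs.length / 8)).map (fun k => String.ofList ((cs.drop (8 * k)).take 8)) =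
      (drainSpec cs).1 := by
  by_cases h8 : 8 ≤ cs.length
  · rw [drainSpec_long h8]
    have hq : cs.length / 8 = (cs.drop 8).length / 8 + 1 := by simp; omega
    rw [hq, List.range_succ_eq_map, List.map_cons, List.map_map]
    have hd8 : (cs.drop 8).length % 8 = 0 := by simp; omega
    have ih := chunks_eq' (cs.drop 8) hd8
    refine List.cons_eq_cons.mpr ⟨by simp, ?_⟩
    · rw [← ih]
      apply List.map_congr_left
      intro k _
      simp only [Function.comp_apply, List.drop_drop]
      rw [show 8 * (k + 1) = 8 + 8 * k from by ring]
  · have : cs = [] := List.eq_nil_of_length_eq_zero (by omega)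
    subst this
    rw [drainSpec_short (by simp)]
    simp

theorem chunks_eq (cs : List Char) (h : cs.length % 8 = 0) :
    (PySem.List.pyRange 0 (cs.length : Int) 8).map
        (fun i => String.ofList (PySem.List.slice cs (some i) (some (i + 8)))) =
      (drainSpec cs).1 := by
  rw [pyRange08, List.map_map, ← chunks_eq' cs h]
  have hq : (cs.length + 7) / 8 = cs.length / 8 := by omega
  rw [hq]
  apply List.map_congr_left
  intro k _
  simp only [Function.comp_apply]
  have e : (((8 * k : Nat) : Int) + 8) = ((8 * k + 8 : Nat) : Int) := by push_cast; ring
  rw [e, PySem.List.slice_natCast]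
  congr 2
  omega

-- ===== VERDICT (by name: the statement is the Claim_ definition above) =====
theorem codeStr_spec : Claim_equal_codeStr := by
  intro text code_dic _hdom _hpre
  unfold Spec_codeStr codeStr codeStr_alt codeStrBits
  rw [codeStrBits_eq, alt_fold_eq _ _ _ _ (by simp)]
  simp only [List.nil_append]
  set cs := (text.map (fun it => (PySem.Dict.getD (PySem.Dict.mk code_dic) it "").toList)).flatten with hcs
  have hrem := drainSpec_rem_length cs
  by_cases h : cs.length % 8 = 0
  · -- no padding; remainder is empty
    have hempty : (drainSpec cs).2 = [] := List.eq_nil_of_length_eq_zero (by omega)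
    rw [if_neg (by omega : ¬ cs.length % 8 ≠ 0)]
    simp only [hempty, List.isEmpty_nil, if_pos]
    rw [chunks_eq cs h]
    simp
  · -- padding branch
    have hne : (drainSpec cs).2 ≠ [] := by
      intro hnil; rw [hnil] at hrem; simp at hrem; omega
    rw [if_pos (by omega : cs.length % 8 ≠ 0)]
    rw [if_neg (by simpa using hne)]
    set pad := List.replicate (8 - cs.length % 8) '0' with hpad
    have hplen : (cs ++ pad).length % 8 = 0 := by
      simp [hpad]; omega
    simp only []
    rw [show ((cs ++ pad).length : Int) = (((cs ++ pad).length : Nat) : Int) from rfl]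
    rw [chunks_eq (cs ++ pad) hplen, drainSpec_append cs pad]
    have hlen8 : ((drainSpec cs).2 ++ pad).length = 8 := by
      simp [hpad]; omega
    rw [drainSpec_long (buf := (drainSpec cs).2 ++ pad) (by omega)]
    rw [drainSpec_short (by simp [hlen8] : ¬ 8 ≤ (((drainSpec cs).2 ++ pad).drop 8).length)]
    have htake : ((drainSpec cs).2 ++ pad).take 8 = (drainSpec cs).2 ++ pad := by
      rw [List.take_of_length_le (by omega)]
    refine Prod.ext ?_ ?_
    · simp only [htake]
      congr 3
      rw [hpad]; simp; omega
    · simp; omega
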